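-- pv_equiv track=rewrite | github.com/luam0oliveira/competitive_programming | beecrowd/1076.py | dfs
-- ===== SOURCE A (Python) =====
-- def dfs(node, caminhos, visitados):
--     if visitados[node]:
--         return 0
--     elif not caminhos[node]:
--         visitados[node] = True
--         return 2
--
--     i = 2
--
--     visitados[node] = True
--     while caminhos[node]:
--         paths = dfs(caminhos[node][0], caminhos, visitados)
--         i += paths
--         caminhos[node].pop(0)
--     return i
-- ===== SOURCE B (Python) =====
-- def dfs(node, caminhos, visitados):
--     # Iterative DFS with an explicit stack instead of A's recursion; mutates
--     # visitados the same way and empties each visited node's adjacency list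
--     # (clear() instead of A's one-by-one pop(0)).
--     total = 0
--     stack = [node]
--     while stack:
--         n = stack.pop()
--         if visitados[n]:
--             continue
--         visitados[n] = True
--         total += 2
--         for child in reversed(caminhos[n]):
--             stack.append(child)
--         caminhos[n].clear()
--     return total
-- ===== Notes on version B (the rewrite author's own statement) =====
-- stated objective: alternative
-- what changed: A's recursive DFS (recursion per node plus an inner while that pops caminhos[node] one edge at a time) is replaced by an iterative DFS over an explicit stack with the visited check at pop time, pushing children in reverse and clearing each visited adjacency list in one step.
-- outside the precondition, e.g. on dfs(-1, [[0], []], [False]): A returns 2, B returns 2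
import Mathlib
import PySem

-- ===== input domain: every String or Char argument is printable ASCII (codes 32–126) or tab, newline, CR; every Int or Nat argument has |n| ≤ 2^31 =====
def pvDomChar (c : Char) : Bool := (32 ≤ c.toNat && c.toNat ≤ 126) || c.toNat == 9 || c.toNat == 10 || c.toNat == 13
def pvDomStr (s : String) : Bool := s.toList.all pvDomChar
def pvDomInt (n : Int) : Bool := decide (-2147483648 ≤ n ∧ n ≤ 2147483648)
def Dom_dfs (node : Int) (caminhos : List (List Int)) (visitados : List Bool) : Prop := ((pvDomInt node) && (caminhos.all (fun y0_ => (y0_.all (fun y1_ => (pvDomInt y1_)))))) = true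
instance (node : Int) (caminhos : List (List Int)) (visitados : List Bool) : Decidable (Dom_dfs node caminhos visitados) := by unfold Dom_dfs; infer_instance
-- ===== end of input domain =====

-- B replaces A's recursion by an iterative explicit-stack DFS (alternative decomposition, same cost);
-- both mutate caminhos/visitados in Python (B clears each visited adjacency list where A pops it empty);
-- the equivalence proved here is about the return value.

-- ===== PORT A =====
-- A is recursive with an inner while loop; ported as a fueled mutual recursion
-- (fuel is only a totality guard: the wrapper passes enough fuel, proved below).
def pvCountFalse (v : List Bool) : Nat := v.count false
def pvEdges (g : List (List Int)) : Nat := (g.map List.length).sum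

mutual
def dfsF (fuel : Nat) (node : Int) (g : List (List Int)) (v : List Bool) :
    Option (Int × List (List Int) × List Bool) :=
  match fuel with
  | 0 => none
  | f + 1 =>
    if PySem.List.pyGetD v node false then some (0, g, v)
    else if PySem.List.pyGetD g node [] = [] then some (2, g, PySem.List.pySetD v node true)
    else loopF f node g (PySem.List.pySetD v node true) 2

def loopF (fuel : Nat) (node : Int) (g : List (List Int)) (v : List Bool) (i : Int) :
    Option (Int × List (List Int) × List Bool) :=
  match fuel with
  | 0 => none
  | f + 1 =>
    match PySem.List.pyGetD g node [] with
    | [] => some (i, g, v)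
    | h :: _ =>
      match dfsF f h g v with
      | none => none
      | some (p, gB, v') =>
        match PySem.List.pop? (PySem.List.pyGetD gB node []) 0 with
        | none => none
        | some (_, popped) => loopF f node (PySem.List.pySetD gB node popped) v' (i + p)
end

def dfs (node : Int) (caminhos : List (List Int)) (visitados : List Bool) : Int :=
  match dfsF (2 * (pvCountFalse visitados + pvEdges caminhos) + 1) node caminhos visitados with
  | some (r, _, _) => r
  | none => 0

-- ===== PORT B =====
-- lemma needed by stackRun's decreasing_by (the port cites it by name)
theorem pvCountFalse_set_true {v : List Bool} {s : Nat} (h : v[s]? = some false) :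
    pvCountFalse (v.set s true) < pvCountFalse v := by
  induction v generalizing s with
  | nil => simp at h
  | cons b bs ih =>
    cases s with
    | zero =>
      simp at h
      subst h
      simp [pvCountFalse]
    | succ s =>
      simp at h
      have := ih h
      cases b <;> simpa [pvCountFalse] using this

theorem pvSetD_false_lt {v : List Bool} {n : Int} (h : PySem.List.pyGet? v n = some false) :
    pvCountFalse (PySem.List.pySetD v n true) < pvCountFalse v := by
  unfold PySem.List.pyGet? at h
  cases hi : PySem.List.pyIdx? v.length n with
  | none => rw [hi] at h; simp at h
  | some s =>
    rw [hi] at h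
    simp at h
    have : PySem.List.pySetD v n true = v.set s true := by
      simp [PySem.List.pySetD, PySem.List.pySet?, hi]
    rw [this]
    exact pvCountFalse_set_true h

def stackRun (stack : List Int) (g : List (List Int)) (v : List Bool) (acc : Int) : Int :=
  match stack with
  | [] => acc
  | n :: rest =>
    match hv : PySem.List.pyGet? v n with
    | none => stackRun rest g v acc
    | some true => stackRun rest g v acc
    | some false =>
      match PySem.List.pyGet? g n with
      | none => stackRun rest g v acc
      | some kids =>
        stackRun (kids ++ rest) (PySem.List.pySetD g n []) (PySem.List.pySetD v n true) (acc + 2)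
termination_by (pvCountFalse v, stack.length)
decreasing_by
  · exact Prod.Lex.right _ (by simp)
  · exact Prod.Lex.right _ (by simp)
  · exact Prod.Lex.right _ (by simp)
  · exact Prod.Lex.left _ _ (pvSetD_false_lt hv)

def dfs_alt (node : Int) (caminhos : List (List Int)) (visitados : List Bool) : Int :=
  stackRun [node] caminhos visitados 0

-- ===== PRECONDITION & SPEC =====
-- a valid Python index into the visited list (A evaluates visitados[x] for every examined x)
def pvVIdxB (VL : Nat) (i : Int) : Bool := decide (-(VL : Int) ≤ i) && decide (i < (VL : Int))

-- a usable index into both lists: a valid nonnegative index into both, or a Python-style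
-- negative index when the two lists have equal length (so it names the same slot in both)
def pvValidB (CL VL : Nat) (i : Int) : Bool :=
  (decide (0 ≤ i) && decide (i < ((min CL VL : Nat) : Int))) ||
  (decide (CL = VL) && decide (-(CL : Int) ≤ i) && decide (i < (CL : Int)))

-- the set of slots reachable from s0 through initially-unvisited nodes
-- (plain graph reachability computed as a bounded closure; it does not run either port)
def pvStep (g : List (List Int)) (v : List Bool) (S : List Nat) : List Nat :=
  S ++ ((S.flatMap (fun j => if v.getD j true = false
          then (g.getD j []).filterMap (fun x => PySem.List.pyIdx? v.length x) else [])).filter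
        (fun t => !(S.contains t)))

def pvReach (g : List (List Int)) (v : List Bool) (s0 : Nat) : List Nat :=
  (List.range v.length).foldl (fun S _ => pvStep g v S) [s0]

-- an edge index x the traversal examines: valid for visitados; if its visited slot is
-- False it must also be usable for caminhos, with its slot among the visited set S
def pvNodeOkB (g : List (List Int)) (v : List Bool) (S : List Nat) (x : Int) : Bool :=
  pvVIdxB v.length x &&
  (PySem.List.pyIdx? v.length x).all
    (fun s => v.getD s true || (pvValidB g.length v.length x && S.contains s))

-- every edge out of an unvisited node of S is examinable
def pvOkB (g : List (List Int)) (v : List Bool) (S : List Nat) : Bool :=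
  (List.range g.length).all fun j =>
    !(S.contains j) || v.getD j true || (g.getD j []).all (pvNodeOkB g v S)

-- Pre_ admits exactly the inputs the traversal completes on: the start node must be a
-- valid index into visitados; if its slot is unvisited it must also be usable for
-- caminhos, and every edge reached through initially-unvisited nodes must be
-- examinable (else A raises IndexError there). The only returning inputs excluded are
-- the wraparound accident where a NEGATIVE examined index meets caminhos and visitados
-- of DIFFERENT lengths, so that it names different slots in the two lists (see claim cites).
def Pre_dfs (node : Int) (caminhos : List (List Int)) (visitados : List Bool) : Prop :=
  (pvVIdxB visitados.length node &&
   (PySem.List.pyIdx? visitados.length node).all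
     (fun s => visitados.getD s true ||
        (pvValidB caminhos.length visitados.length node &&
         pvOkB caminhos visitados (pvReach caminhos visitados s)))) = true
instance (node : Int) (caminhos : List (List Int)) (visitados : List Bool) :
    Decidable (Pre_dfs node caminhos visitados) := by unfold Pre_dfs; infer_instance

def pvWitness_dfs : Int × List (List Int) × List Bool := (0, [[1], []], [false, false])

def Spec_dfs (node : Int) (caminhos : List (List Int)) (visitados : List Bool) (out : Int) : Prop := out = dfs_alt node caminhos visitados
instance (node : Int) (caminhos : List (List Int)) (visitados : List Bool) (out : Int) : Decidable (Spec_dfs node caminhos visitados out) := by unfold Spec_dfs; infer_instance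

-- ===== CLAIM (what is proved, stated in full; the proofs are below) =====
def Claim_equal_dfs : Prop := ∀ (node : Int) (caminhos : List (List Int)) (visitados : List Bool), Dom_dfs node caminhos visitados → Pre_dfs node caminhos visitados → Spec_dfs node caminhos visitados (dfs node caminhos visitados)

-- ===== LEMMAS AND PROOFS =====

-- Prop forms of the precondition's conditions, used by the loop invariant
def pvVIdx (VL : Nat) (i : Int) : Prop := -(VL : Int) ≤ i ∧ i < (VL : Int)

def pvValid (CL VL : Nat) (i : Int) : Prop :=
  (0 ≤ i ∧ i < ((min CL VL : Nat) : Int)) ∨ (CL = VL ∧ -(CL : Int) ≤ i ∧ i < (CL : Int))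

def pvNodeOk (g : List (List Int)) (v : List Bool) (P : Nat → Prop) (x : Int) : Prop :=
  pvVIdx v.length x ∧ ∀ s : Nat, s < v.length → PySem.List.pyIdx? v.length x = some s →
    v.getD s true = false → pvValid g.length v.length x ∧ P s

def pvOk (g : List (List Int)) (v : List Bool) (P : Nat → Prop) : Prop :=
  ∀ j : Nat, j < g.length → P j → v.getD j true = false →
    ∀ x ∈ g.getD j [], pvNodeOk g v P x

theorem pvVIdxB_iff {VL : Nat} {i : Int} : pvVIdxB VL i = true ↔ pvVIdx VL i := by
  simp [pvVIdxB, pvVIdx]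

theorem pvValidB_iff {CL VL : Nat} {i : Int} : pvValidB CL VL i = true ↔ pvValid CL VL i := by
  simp [pvValidB, pvValid, and_assoc]

-- relation between A's caminhos and B's: B may differ on already-visited slots
def pvRel (g : List (List Int)) (v : List Bool) (gB : List (List Int)) : Prop :=
  gB.length = g.length ∧ ∀ j, j < g.length → v[j]? = some false → gB[j]? = g[j]?

theorem pvIdx_lt {L : Nat} {i : Int} {s : Nat} (h : PySem.List.pyIdx? L i = some s) : s < L := by
  unfold PySem.List.pyIdx? at h
  split_ifs at h <;> simp_all <;> omega

theorem pvVIdx_idx {VL : Nat} {i : Int} (h : pvVIdx VL i) :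
    ∃ s : Nat, PySem.List.pyIdx? VL i = some s ∧ s < VL := by
  obtain ⟨h1, h2⟩ := h
  unfold PySem.List.pyIdx?
  by_cases h0 : 0 ≤ i
  · refine ⟨i.toNat, ?_⟩
    split_ifs <;> simp_all <;> omega
  · refine ⟨VL - (-i).toNat, ?_⟩
    split_ifs <;> simp_all <;> omega

theorem pvValid_idx {CL VL : Nat} {i : Int} (h : pvValid CL VL i) :
    ∃ s : Nat, PySem.List.pyIdx? CL i = some s ∧ PySem.List.pyIdx? VL i = some s ∧
      s < CL ∧ s < VL := by
  unfold pvValid at h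
  unfold PySem.List.pyIdx?
  rcases h with ⟨h0, hm⟩ | ⟨he, h1, h2⟩
  · refine ⟨i.toNat, ?_⟩
    split_ifs <;> simp_all <;> omega
  · subst he
    by_cases h0 : 0 ≤ i
    · refine ⟨i.toNat, ?_⟩
      split_ifs <;> simp_all <;> omega
    · refine ⟨CL - (-i).toNat, ?_⟩
      split_ifs <;> simp_all <;> omega

theorem pvGet_eq {α : Type} {xs : List α} {i : Int} {s : Nat}
    (h : PySem.List.pyIdx? xs.length i = some s) : PySem.List.pyGet? xs i = xs[s]? := by
  simp [PySem.List.pyGet?, h]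

theorem pvSet_eq {α : Type} {xs : List α} {i : Int} {s : Nat} (x : α)
    (h : PySem.List.pyIdx? xs.length i = some s) : PySem.List.pySetD xs i x = xs.set s x := by
  simp [PySem.List.pySetD, PySem.List.pySet?, h]

theorem pvGetD_eq {α : Type} {xs : List α} {i : Int} {s : Nat} (d : α)
    (h : PySem.List.pyIdx? xs.length i = some s) : PySem.List.pyGetD xs i d = xs.getD s d := by
  simp [PySem.List.pyGetD, pvGet_eq (s := s) h, List.getD_eq_getElem?_getD]

theorem pvGetElem?_eq_getD {α : Type} {xs : List α} {s : Nat} (d : α) (h : s < xs.length) :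
    xs[s]? = some (xs.getD s d) := by
  rw [List.getD_eq_getElem?_getD, List.getElem?_eq_getElem h]; rfl

theorem pvEdges_set {g : List (List Int)} {s : Nat} {l l2 : List Int} (h : g[s]? = some l) :
    pvEdges (g.set s l2) + l.length = pvEdges g + l2.length := by
  induction g generalizing s with
  | nil => simp at h
  | cons a as ih =>
    cases s with
    | zero => simp at h; subst h; simp [pvEdges]; omega
    | succ s =>
      simp at h
      have := ih h
      simp [pvEdges, List.set] at this ⊢
      omega

theorem pvRel_refl (g : List (List Int)) (v : List Bool) : pvRel g v g := by
  exact ⟨rfl, fun _ _ _ => rfl⟩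

theorem pvFlagOfSome {v : List Bool} {s : Nat} {b : Bool} (h : v[s]? = some b) :
    v.getD s true = b := by
  rw [List.getD_eq_getElem?_getD, h]; rfl

theorem pvSetTrueFalse {v : List Bool} {s t : Nat}
    (h : (v.set s true).getD t true = false) : v.getD t true = false := by
  by_cases hts : t = s
  · subst hts
    by_cases hl : t < v.length
    · rw [pvFlagOfSome (List.getElem?_set_self hl)] at h
      simp at h
    · rw [List.set_eq_of_length_le (by omega)] at h
      exact h
  · rwa [List.getD_eq_getElem?_getD, List.getElem?_set_ne (Ne.symm hts),
      ← List.getD_eq_getElem?_getD] at h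

theorem pvNodeOk_mono {g g' : List (List Int)} {v v' : List Bool} {P : Nat → Prop} {x : Int}
    (hg : g'.length = g.length) (hv : v'.length = v.length)
    (hmf : ∀ t, v'.getD t true = false → v.getD t true = false)
    (h : pvNodeOk g v P x) : pvNodeOk g' v' P x := by
  obtain ⟨h1, h2⟩ := h
  refine ⟨by rw [pvVIdx, hv]; exact h1, ?_⟩
  intro s hlt heq hf
  rw [hv] at hlt heq
  have := h2 s hlt heq (hmf s hf)
  rw [pvValid, hg, hv]
  exact this

theorem stackRun_skip {n : Int} {rest : List Int} {g : List (List Int)} {v : List Bool} {acc : Int}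
    (h : PySem.List.pyGet? v n = some true) :
    stackRun (n :: rest) g v acc = stackRun rest g v acc := by
  rw [stackRun]
  split <;> first
    | rfl
    | (rename_i hv; rw [h] at hv; simp at hv)

theorem stackRun_visit {n : Int} {rest : List Int} {g : List (List Int)} {v : List Bool}
    {acc : Int} {kids : List Int}
    (h : PySem.List.pyGet? v n = some false) (h2 : PySem.List.pyGet? g n = some kids) :
    stackRun (n :: rest) g v acc =
      stackRun (kids ++ rest) (PySem.List.pySetD g n []) (PySem.List.pySetD v n true) (acc + 2) := by
  rw [stackRun]
  split <;> rename_i hv <;> rw [h] at hv <;> try simp at hv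
  split <;> rename_i hg <;> rw [h2] at hg <;> simp at hg
  subst hg
  rfl

theorem pvMem_pvStep {g : List (List Int)} {v : List Bool} {S : List Nat} {a : Nat}
    (h : a ∈ S) : a ∈ pvStep g v S := by
  unfold pvStep
  exact List.mem_append_left _ h

theorem pvMem_reach_init (g : List (List Int)) (v : List Bool) (s0 : Nat) :
    s0 ∈ pvReach g v s0 := by
  unfold pvReach
  have : ∀ (l : List Nat) (S : List Nat), s0 ∈ S →
      s0 ∈ l.foldl (fun S _ => pvStep g v S) S := by
    intro l
    induction l with
    | nil => intro S h; exact h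
    | cons a l ih => intro S h; exact ih _ (pvMem_pvStep h)
  exact this _ _ (List.mem_singleton.mpr rfl)

theorem pvNodeOkB_ok {g : List (List Int)} {v : List Bool} {S : List Nat} {x : Int}
    (h : pvNodeOkB g v S x = true) : pvNodeOk g v (fun j => j ∈ S) x := by
  unfold pvNodeOkB at h
  rw [Bool.and_eq_true] at h
  obtain ⟨h1, h2⟩ := h
  refine ⟨pvVIdxB_iff.mp h1, ?_⟩
  intro s _ heq hf
  rw [heq] at h2
  simp only [Option.all_some, hf, Bool.false_or, Bool.and_eq_true] at h2
  exact ⟨pvValidB_iff.mp h2.1, by simpa using h2.2⟩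

theorem pvOkB_ok {g : List (List Int)} {v : List Bool} {S : List Nat}
    (h : pvOkB g v S = true) : pvOk g v (fun j => j ∈ S) := by
  intro j hj hPj hjf x hx
  unfold pvOkB at h
  rw [List.all_eq_true] at h
  have := h j (List.mem_range.mpr hj)
  rw [hjf] at this
  simp only [Bool.or_false, Bool.or_eq_true, Bool.not_eq_eq_eq_not, Bool.not_true] at this
  have hcj : S.contains j = true := by simpa using hPj
  rcases this with hc | hall
  · rw [hcj] at hc; simp at hc
  · rw [List.all_eq_true] at hall
    exact pvNodeOkB_ok (hall x hx)

-- combined statements for the fuel induction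
def PdStmt (f : Nat) : Prop :=
  ∀ (n : Int) (g : List (List Int)) (v : List Bool) (P : Nat → Prop),
    pvOk g v P → pvNodeOk g v P n →
    2 * (pvCountFalse v + pvEdges g) + 1 ≤ f →
    ∃ r g2 v2, dfsF f n g v = some (r, g2, v2)
      ∧ g2.length = g.length ∧ v2.length = v.length
      ∧ (∀ j : Nat, v2[j]? = some false → g2[j]? = g[j]?)
      ∧ pvCountFalse v2 + pvEdges g2 ≤ pvCountFalse v + pvEdges g
      ∧ (∀ j : Nat, v[j]? = some true → v2[j]? = some true)
      ∧ (∀ j : Nat, v[j]? = some true → g2[j]? = g[j]?)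
      ∧ pvOk g2 v2 P
      ∧ ∀ gB acc rest, pvRel g v gB →
          ∃ gB2, pvRel g2 v2 gB2 ∧ stackRun (n :: rest) gB v acc = stackRun rest gB2 v2 (acc + r)

def PlStmt (f : Nat) : Prop :=
  ∀ (n : Int) (g : List (List Int)) (v : List Bool) (i : Int) (s : Nat) (P : Nat → Prop),
    pvOk g v P → (∀ x ∈ g.getD s [], pvNodeOk g v P x) →
    PySem.List.pyIdx? g.length n = some s → PySem.List.pyIdx? v.length n = some s →
    v[s]? = some true →
    2 * (pvCountFalse v + pvEdges g) + 2 ≤ f →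
    ∃ r g2 v2, loopF f n g v i = some (r, g2, v2)
      ∧ g2.length = g.length ∧ v2.length = v.length
      ∧ (∀ j : Nat, v2[j]? = some false → g2[j]? = g[j]?)
      ∧ pvCountFalse v2 + pvEdges g2 ≤ pvCountFalse v + pvEdges g
      ∧ (∀ j : Nat, v[j]? = some true → v2[j]? = some true)
      ∧ (∀ j : Nat, j ≠ s → v[j]? = some true → g2[j]? = g[j]?)
      ∧ pvOk g2 v2 P
      ∧ ∀ gB acc rest, pvRel g v gB →
          ∃ gB2, pvRel g2 v2 gB2 ∧ stackRun ((g.getD s []) ++ rest) gB v acc = stackRun rest gB2 v2 (acc + (r - i))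

theorem pvMain : ∀ f : Nat, PdStmt f ∧ PlStmt f := by
  intro f
  induction f with
  | zero =>
    refine ⟨?_, ?_⟩
    · unfold PdStmt; intro n g v P _ _ hf; omega
    · unfold PlStmt; intro n g v i s P _ _ _ _ _ hf; omega
  | succ f ih =>
    obtain ⟨ihd, ihl⟩ := ih
    constructor
    · -- PdStmt (f+1)
      unfold PdStmt
      intro n g v P hok hn hf
      obtain ⟨hnv, hn2⟩ := hn
      obtain ⟨sv, hsv, hslv⟩ := pvVIdx_idx hnv
      have hvget : PySem.List.pyGetD v n false = v.getD sv false := pvGetD_eq false hsv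
      have hbs : v[sv]? = some (v.getD sv false) := pvGetElem?_eq_getD false hslv
      cases hbool : v.getD sv false with
      | true =>
        rw [hbool] at hbs
        refine ⟨0, g, v, ?_, rfl, rfl, fun j _ => rfl, le_refl _, fun j hj => hj,
          fun j _ => rfl, hok, ?_⟩
        · simp [dfsF, hvget, hbs, List.getD_eq_getElem?_getD]
        · intro gB acc rest hRel
          refine ⟨gB, hRel, ?_⟩
          have hpyv : PySem.List.pyGet? v n = some true := by rw [pvGet_eq hsv, hbs]
          rw [stackRun_skip hpyv]
          norm_num
      | false =>
        rw [hbool] at hbs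
        have hvfd : v.getD sv true = false := pvFlagOfSome hbs
        obtain ⟨hval, hP⟩ := hn2 sv hslv hsv hvfd
        obtain ⟨s', hsc, hsv', hsl', _⟩ := pvValid_idx hval
        have hss : s' = sv := by rw [hsv] at hsv'; exact (Option.some.inj hsv').symm
        have hs : PySem.List.pyIdx? g.length n = some sv := hss ▸ hsc
        have hsl : sv < g.length := hss ▸ hsl'
        have hpyv : PySem.List.pyGet? v n = some false := by rw [pvGet_eq hsv, hbs]
        have hcf : pvCountFalse (v.set sv true) < pvCountFalse v := pvCountFalse_set_true hbs
        have hv1eq : PySem.List.pySetD v n true = v.set sv true := pvSet_eq true hsv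
        have hset_s : (v.set sv true)[sv]? = some true := List.getElem?_set_self hslv
        have hok1 : pvOk g (v.set sv true) P := by
          intro j hj hPj hjf x hx
          exact pvNodeOk_mono rfl (List.length_set ..) (fun t => pvSetTrueFalse)
            (hok j hj hPj (pvSetTrueFalse hjf) x hx)
        have hmono : ∀ j : Nat, v[j]? = some true → (v.set sv true)[j]? = some true := by
          intro j hj
          by_cases hjs : j = sv
          · subst hjs; exact hset_s
          · rw [List.getElem?_set_ne (Ne.symm hjs)]; exact hj
        have hgget : PySem.List.pyGetD g n [] = g.getD sv [] := pvGetD_eq [] hs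
        cases hgs : g.getD sv [] with
        | nil =>
          have hgsome : g[sv]? = some [] := by rw [pvGetElem?_eq_getD [] hsl, hgs]
          refine ⟨2, g, v.set sv true, ?_, rfl, List.length_set .., fun j _ => rfl, by omega,
            hmono, fun j _ => rfl, hok1, ?_⟩
          · simp [dfsF, hvget, hbs, hgget, hgsome, hv1eq, List.getD_eq_getElem?_getD]
          · intro gB acc rest hRel
            obtain ⟨hlB, hB⟩ := hRel
            have hsB : PySem.List.pyIdx? gB.length n = some sv := by rw [hlB]; exact hs
            have hkB : PySem.List.pyGet? gB n = some [] := by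
              rw [pvGet_eq hsB, hB sv hsl hbs, hgsome]
            rw [stackRun_visit hpyv hkB, pvSet_eq [] hsB, hv1eq]
            refine ⟨gB.set sv [], ⟨by rw [List.length_set, hlB], ?_⟩, by simp⟩
            intro j hj hjf
            have hjs : j ≠ sv := by
              intro e; subst e
              rw [hset_s] at hjf; simp at hjf
            rw [List.getElem?_set_ne (Ne.symm hjs)]
            rw [List.getElem?_set_ne (Ne.symm hjs)] at hjf
            exact hB j hj hjf
        | cons hd tl =>
          have hgsome : g[sv]? = some (hd :: tl) := by rw [pvGetElem?_eq_getD [] hsl, hgs]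
          have hpend : ∀ x ∈ g.getD sv [], pvNodeOk g (v.set sv true) P x := by
            intro x hx
            exact pvNodeOk_mono rfl (List.length_set ..) (fun t => pvSetTrueFalse)
              (hok sv hsl hP hvfd x hx)
          obtain ⟨r, g2, v2, heq, hlg2, hlv2, hunv, hm2, hmono2, hpres2, hok2, hsim2⟩ :=
            ihl n g (v.set sv true) 2 sv P hok1 hpend hs
              (by rw [List.length_set]; exact hsv) hset_s (by omega)
          refine ⟨r, g2, v2, ?_, hlg2, by rw [hlv2, List.length_set], ?_, by omega,
            fun j hj => hmono2 j (hmono j hj), ?_, hok2, ?_⟩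
          · simp [dfsF, hvget, hbs, hgget, hgsome, hv1eq, List.getD_eq_getElem?_getD]
            exact heq
          · intro j hj
            exact hunv j hj
          · intro j hj
            have hjs : j ≠ sv := by
              intro e; subst e; rw [hbs] at hj; simp at hj
            exact hpres2 j hjs (hmono j hj)
          · intro gB acc rest hRel
            obtain ⟨hlB, hB⟩ := hRel
            have hsB : PySem.List.pyIdx? gB.length n = some sv := by rw [hlB]; exact hs
            have hkB : PySem.List.pyGet? gB n = some (hd :: tl) := by
              rw [pvGet_eq hsB, hB sv hsl hbs, hgsome]
            have hRel1 : pvRel g (v.set sv true) (gB.set sv []) := by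
              refine ⟨by rw [List.length_set, hlB], ?_⟩
              intro j hj hjf
              have hjs : j ≠ sv := by
                intro e; subst e; rw [hset_s] at hjf; simp at hjf
              rw [List.getElem?_set_ne (Ne.symm hjs)] at hjf
              rw [List.getElem?_set_ne (Ne.symm hjs)]
              exact hB j hj hjf
            obtain ⟨gB2, hRel2, heqs⟩ := hsim2 (gB.set sv []) (acc + 2) rest hRel1
            refine ⟨gB2, hRel2, ?_⟩
            rw [stackRun_visit hpyv hkB, pvSet_eq [] hsB, hv1eq]
            rw [hgs] at heqs
            rw [heqs]
            congr 1
            ring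
    · -- PlStmt (f+1)
      unfold PlStmt
      intro n g v i s P hok hpend hs hsv hvs hf
      have hsl : s < g.length := pvIdx_lt hs
      have hgget : PySem.List.pyGetD g n [] = g.getD s [] := pvGetD_eq [] hs
      cases hgs : g.getD s [] with
      | nil =>
        have hgsome : g[s]? = some [] := by rw [pvGetElem?_eq_getD [] hsl, hgs]
        refine ⟨i, g, v, ?_, rfl, rfl, fun j _ => rfl, le_refl _, fun j hj => hj,
          fun j _ _ => rfl, hok, ?_⟩
        · simp [loopF, hgget, hgsome, List.getD_eq_getElem?_getD]
        · intro gB acc rest hRel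
          exact ⟨gB, hRel, by simp⟩
      | cons hd tl =>
        have hgsome : g[s]? = some (hd :: tl) := by rw [pvGetElem?_eq_getD [] hsl, hgs]
        have hhdin : pvNodeOk g v P hd := by
          apply hpend
          rw [hgs]
          exact List.mem_cons_self
        obtain ⟨p, gm, vm, heq1, hlgm, hlvm, hunv1, hm1, hmono1, hpres1, hokm, hsim1⟩ :=
          ihd hd g v P hok hhdin (by omega)
        have hgms : gm[s]? = some (hd :: tl) := by rw [hpres1 s hvs, hgsome]
        have hsm : PySem.List.pyIdx? gm.length n = some s := by rw [hlgm]; exact hs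
        have hslm : s < gm.length := by omega
        have hpopget : PySem.List.pyGetD gm n [] = hd :: tl := by
          rw [pvGetD_eq [] hsm, List.getD_eq_getElem?_getD, hgms]; rfl
        have hpy3 : PySem.List.pySetD gm n tl = gm.set s tl := pvSet_eq tl hsm
        have hE : pvEdges (gm.set s tl) + (hd :: tl).length = pvEdges gm + tl.length :=
          pvEdges_set hgms
        have hE2 : pvEdges (gm.set s tl) + 1 = pvEdges gm := by simp at hE; omega
        have hvms : vm[s]? = some true := hmono1 s hvs
        have hl3 : (gm.set s tl).length = g.length := by rw [List.length_set]; exact hlgm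
        have htl : (gm.set s tl).getD s [] = tl := by
          rw [List.getD_eq_getElem?_getD, List.getElem?_set_self hslm]; rfl
        have hmfalse : ∀ j : Nat, vm[j]? = some false → v[j]? = some false := by
          intro j hj
          cases hjv : v[j]? with
          | none =>
            rw [List.getElem?_eq_none_iff] at hjv
            have : vm[j]? = none := by rw [List.getElem?_eq_none_iff]; omega
            rw [this] at hj; simp at hj
          | some b =>
            cases b
            · rfl
            · rw [hmono1 j hjv] at hj; simp at hj
        have hmfd : ∀ t : Nat, vm.getD t true = false → v.getD t true = false := by
          intro t ht
          cases hvt : vm[t]? with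
          | none =>
            rw [List.getD_eq_getElem?_getD, hvt] at ht
            simp at ht
          | some b =>
            cases b
            · exact pvFlagOfSome (hmfalse t hvt)
            · rw [pvFlagOfSome hvt] at ht; simp at ht
        have hok3 : pvOk (gm.set s tl) vm P := by
          intro j hj hPj hjf x hx
          have hjs : j ≠ s := by
            intro e; subst e
            rw [pvFlagOfSome hvms] at hjf; simp at hjf
          rw [List.getD_eq_getElem?_getD, List.getElem?_set_ne (Ne.symm hjs),
            ← List.getD_eq_getElem?_getD] at hx
          exact pvNodeOk_mono (by rw [List.length_set]) rfl (fun t ht => ht)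
            (hokm j (by omega) hPj hjf x hx)
        have hpend3 : ∀ x ∈ (gm.set s tl).getD s [], pvNodeOk (gm.set s tl) vm P x := by
          intro x hx
          rw [htl] at hx
          have hxg : x ∈ g.getD s [] := by rw [hgs]; exact List.mem_cons_of_mem hd hx
          exact pvNodeOk_mono (by rw [hl3]) hlvm hmfd (hpend x hxg)
        obtain ⟨r, g2, v2, heq2, hlg2, hlv2, hunv2, hm2, hmono2, hpres2, hok2, hsim2⟩ :=
          ihl n (gm.set s tl) vm (i + p) s P hok3 hpend3
            (by rw [hl3]; exact hs) (by rw [hlvm]; exact hsv) hvms (by omega)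
        have hv2s : v2[s]? = some true := hmono2 s hvms
        refine ⟨r, g2, v2, ?_, by rw [hlg2, hl3], by rw [hlv2, hlvm], ?_,
          by omega, fun j hj => hmono2 j (hmono1 j hj), ?_, ?_, ?_⟩
        · simp only [loopF, hgget, hgs, heq1, hpopget, PySem.List.pop?_zero_cons, hpy3]
          exact heq2
        · -- unvisited slots of the final state are untouched
          intro j hj
          have hjs : j ≠ s := by
            intro e; subst e; rw [hv2s] at hj; simp at hj
          have hmf : vm[j]? = some false := by
            cases hjv : vm[j]? with
            | none =>
              rw [List.getElem?_eq_none_iff] at hjv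
              have : v2[j]? = none := by rw [List.getElem?_eq_none_iff]; omega
              rw [this] at hj; simp at hj
            | some b =>
              cases b
              · rfl
              · rw [hmono2 j hjv] at hj; simp at hj
          rw [hunv2 j hj, List.getElem?_set_ne (Ne.symm hjs), hunv1 j hmf]
        · intro j hjs hj
          rw [hpres2 j hjs (hmono1 j hj), List.getElem?_set_ne (Ne.symm hjs), hpres1 j hj]
        · exact hok2
        · intro gB acc rest hRel
          obtain ⟨gBm, hRelm, heqs1⟩ := hsim1 gB acc (tl ++ rest) hRel
          have hRel3 : pvRel (gm.set s tl) vm gBm := by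
            obtain ⟨hlBm, hBm⟩ := hRelm
            refine ⟨by rw [hlBm, hlgm, ← hl3], ?_⟩
            intro j hj hjf
            have hjs : j ≠ s := by
              intro e; subst e; rw [hvms] at hjf; simp at hjf
            rw [List.getElem?_set_ne (Ne.symm hjs)]
            exact hBm j (by rw [hl3] at hj; omega) hjf
          obtain ⟨gB2, hRel4, heqs2⟩ := hsim2 gBm (acc + p) rest hRel3
          refine ⟨gB2, hRel4, ?_⟩
          rw [List.cons_append, heqs1]
          rw [htl] at heqs2
          rw [heqs2]
          congr 1
          ring

-- ===== VERDICT (by name: the statement is the Claim_ definition above) =====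
theorem dfs_spec : Claim_equal_dfs := by
  unfold Claim_equal_dfs
  intro node caminhos visitados _ hpre
  unfold Pre_dfs at hpre
  rw [Bool.and_eq_true] at hpre
  obtain ⟨h1, h2⟩ := hpre
  have hvidx : pvVIdx visitados.length node := pvVIdxB_iff.mp h1
  obtain ⟨sv, hsv, hslv⟩ := pvVIdx_idx hvidx
  rw [hsv] at h2
  rw [Option.all_some] at h2
  unfold Spec_dfs dfs dfs_alt
  cases hbool : visitados.getD sv true with
  | true =>
    -- start already visited: instantiate the invariant with the empty slot set
    have hok : pvOk caminhos visitados (fun _ => False) := by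
      intro j _ hPj; exact hPj.elim
    have hn : pvNodeOk caminhos visitados (fun _ => False) node := by
      refine ⟨hvidx, ?_⟩
      intro s _ heq hf
      have : s = sv := by rw [hsv] at heq; exact (Option.some.inj heq).symm
      subst this
      rw [hbool] at hf
      simp at hf
    obtain ⟨r, g2, v2, heq, _, _, _, _, _, _, _, hsim⟩ :=
      (pvMain (2 * (pvCountFalse visitados + pvEdges caminhos) + 1)).1 node caminhos visitados
        (fun _ => False) hok hn (le_refl _)
    obtain ⟨gB2, _, hrun⟩ := hsim caminhos 0 [] (pvRel_refl caminhos visitados)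
    rw [heq, hrun]
    simp [stackRun]
  | false =>
    rw [hbool] at h2
    simp only [Bool.false_or, Bool.and_eq_true] at h2
    have hval : pvValid caminhos.length visitados.length node := pvValidB_iff.mp h2.1
    have hok := pvOkB_ok h2.2
    have hn : pvNodeOk caminhos visitados
        (fun j => j ∈ pvReach caminhos visitados sv) node := by
      refine ⟨hvidx, ?_⟩
      intro s _ heq _
      have : s = sv := by rw [hsv] at heq; exact (Option.some.inj heq).symm
      subst this
      exact ⟨hval, pvMem_reach_init _ _ _⟩
    obtain ⟨r, g2, v2, heq, _, _, _, _, _, _, _, hsim⟩ :=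
      (pvMain (2 * (pvCountFalse visitados + pvEdges caminhos) + 1)).1 node caminhos visitados
        (fun j => j ∈ pvReach caminhos visitados sv) hok hn (le_refl _)
    obtain ⟨gB2, _, hrun⟩ := hsim caminhos 0 [] (pvRel_refl caminhos visitados)
    rw [heq, hrun]
    simp [stackRun]
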